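-- pv_equiv track=rewrite | github.com/tirupatihemanth/2048Algo | 2048sourcecode.py | merger
-- ===== SOURCE A (Python) =====
-- def sorter(linelist):
--     """ A function to separate all the non-zero and zero tiles"""
--     for dummy_row in range(len(linelist)-1):
--         for idx in range(len(linelist)):
--             if linelist[idx]==0 and idx<len(linelist)-1:
--                 temp=linelist[idx];
--                 linelist[idx]=linelist[idx+1];
--                 linelist[idx+1]=temp;
--     return linelist;
--
-- def merger(linelist2):
--     """A function to merge sorted list"""
--     linelist = linelist2;
--     for idx in range(len(linelist)-1):
--         if linelist[idx]==linelist[idx+1]: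
--             linelist[idx]+=linelist[idx+1];
--             linelist[idx+1]=0;
--     linelistx=sorter(linelist);
--     return linelistx;
-- ===== SOURCE B (Python) =====
-- def merger(linelist2):
--     """Single left-to-right merge pass, then stable partition of non-zeros
--     before zeros (O(n) total).  Mutates linelist2 in place like the original."""
--     if not linelist2:
--         return linelist2
--     nonzeros = []
--     cur = linelist2[0]
--     for x in linelist2[1:]:
--         if cur == x:
--             if cur:
--                 nonzeros.append(cur + x)
--             cur = 0
--         else:
--             if cur:
--                 nonzeros.append(cur)
--             cur = x
--     if cur:
--         nonzeros.append(cur)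
--     linelist2[:] = nonzeros + [0] * (len(linelist2) - len(nonzeros))
--     return linelist2
-- ===== Notes on version B (the rewrite author's own statement) =====
-- stated objective: faster
-- what changed: Replaced the O(n^2) repeated bubble passes that push zeros right with a single left-to-right merge pass that collects non-zero results and then pads with zeros (linear stable partition).
import Mathlib
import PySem

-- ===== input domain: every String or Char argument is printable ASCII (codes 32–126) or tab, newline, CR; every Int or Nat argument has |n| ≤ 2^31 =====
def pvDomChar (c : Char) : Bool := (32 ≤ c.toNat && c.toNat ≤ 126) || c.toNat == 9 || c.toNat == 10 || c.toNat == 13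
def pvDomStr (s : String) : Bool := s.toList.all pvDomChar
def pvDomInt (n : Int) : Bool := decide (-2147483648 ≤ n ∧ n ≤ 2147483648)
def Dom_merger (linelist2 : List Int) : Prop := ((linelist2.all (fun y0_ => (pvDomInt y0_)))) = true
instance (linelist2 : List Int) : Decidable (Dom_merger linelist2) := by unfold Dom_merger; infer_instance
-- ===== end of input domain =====

-- B replaces A's O(n^2) bubble-style zero-pushing with a single merge pass plus a
-- linear stable partition (objective: faster, asymptotic).  A mutates its argument
-- in place and returns it; B performs the same in-place mutation; the equivalence
-- proved here is about the return value.


-- ===== PORT A =====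
-- one inner bubble pass of sorter: for idx in range(len(linelist)): swap a zero right
def sorterPass (a : List Int) : List Int :=
  (List.range a.length).foldl
    (fun b idx =>
      if b.getD idx 0 = 0 ∧ idx < b.length - 1 then
        -- temp = b[idx]; b[idx] = b[idx+1]; b[idx+1] = temp
        let temp := b.getD idx 0
        (b.set idx (b.getD (idx+1) 0)).set (idx+1) temp
      else b) a

def sorterA (linelist : List Int) : List Int :=
  (List.range (linelist.length - 1)).foldl (fun a _ => sorterPass a) linelist

-- 'linelist = linelist2' in Python is an alias, so the merge loop runs directly on linelist2
def merger (linelist2 : List Int) : List Int :=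
  sorterA
    ((List.range (linelist2.length - 1)).foldl
      (fun a idx =>
        if a.getD idx 0 = a.getD (idx+1) 0 then
          (a.set idx (a.getD idx 0 + a.getD (idx+1) 0)).set (idx+1) 0
        else a) linelist2)

-- ===== PORT B =====
-- fold step of B's single pass: state = (collected non-zeros, current value)
def stepB (p : List Int × Int) (x : Int) : List Int × Int :=
  if p.2 = x then (if p.2 ≠ 0 then p.1 ++ [p.2 + x] else p.1, 0)
  else (if p.2 ≠ 0 then p.1 ++ [p.2] else p.1, x)

-- final 'if cur: nonzeros.append(cur)' of B's pass
def nzOf (p : List Int × Int) : List Int :=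
  if p.2 ≠ 0 then p.1 ++ [p.2] else p.1

def merger_alt (linelist2 : List Int) : List Int :=
  match linelist2 with
  | [] => []
  | c :: rest =>
    let nz := nzOf (rest.foldl stepB ([], c))
    nz ++ List.replicate (linelist2.length - nz.length) 0

-- ===== PRECONDITION & SPEC =====
def Spec_merger (linelist2 : List Int) (out : List Int) : Prop := out = merger_alt linelist2
instance (linelist2 : List Int) (out : List Int) : Decidable (Spec_merger linelist2 out) := by unfold Spec_merger; infer_instance

-- ===== CLAIM (what is proved, stated in full; the proofs are below) =====
def Claim_equal_merger : Prop := ∀ (linelist2 : List Int), Dom_merger linelist2 → Spec_merger linelist2 (merger linelist2)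

-- ===== LEMMAS AND PROOFS =====

-- structural model of A's in-place merge loop
def M : List Int → List Int
  | [] => []
  | [x] => [x]
  | x :: y :: t => if x = y then (x+y) :: M (0 :: t) else x :: M (y :: t)
termination_by l => l.length
decreasing_by all_goals simp

-- structural model of one sorter pass: the first zero bubbles to the end
def P : List Int → List Int
  | [] => []
  | x :: t => if x = 0 then t ++ [0] else x :: P t

-- the stable partition both sides reach
def part (l : List Int) : List Int :=
  l.filter (· ≠ 0) ++ List.replicate (l.length - (l.filter (· ≠ 0)).length) 0

-- number of zeros that still precede some non-zero
def badZeros : List Int → Nat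
  | [] => 0
  | x :: t => (if x = 0 ∧ t.any (· ≠ 0) then 1 else 0) + badZeros t

-- ---- generic index/list facts ----
lemma getD_append_len (u : List Int) (x : Int) (r : List Int) :
    (u ++ x :: r).getD u.length 0 = x := by
  simp

lemma getD_append_len1 (u : List Int) (x y : Int) (r : List Int) :
    (u ++ x :: y :: r).getD (u.length + 1) 0 = y := by
  have h2 : u ++ x :: y :: r = (u ++ [x]) ++ y :: r := by simp
  have h : u.length + 1 = (u ++ [x]).length := by simp
  rw [h2, h, getD_append_len]

lemma set_append_len (u : List Int) (x : Int) (r : List Int) (v : Int) :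
    (u ++ x :: r).set u.length v = u ++ v :: r := by
  rw [List.set_append_right _ _ (Nat.le_refl _)]
  simp

lemma set_append_len1 (u : List Int) (x y : Int) (r : List Int) (v : Int) :
    (u ++ x :: y :: r).set (u.length + 1) v = u ++ x :: v :: r := by
  have h2 : u ++ x :: y :: r = (u ++ [x]) ++ y :: r := by simp
  have h : u.length + 1 = (u ++ [x]).length := by simp
  rw [h2, h, set_append_len]
  simp

lemma foldl_range_const {A : Type} (g : A → A) (k : Nat) (a : A) :
    (List.range k).foldl (fun x _ => g x) a = g^[k] a := by
  induction k generalizing a with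
  | zero => simp
  | succ n ih => rw [List.range_succ, List.foldl_append, ih, Function.iterate_succ_apply']; rfl

-- ---- A's merge loop equals M ----
lemma mergeFold (w u : List Int) :
    (List.range' u.length (w.length - 1)).foldl
      (fun a idx =>
        if a.getD idx 0 = a.getD (idx+1) 0 then
          (a.set idx (a.getD idx 0 + a.getD (idx+1) 0)).set (idx+1) 0
        else a) (u ++ w) = u ++ M w := by
  induction w using M.induct generalizing u with
  | case1 => simp [M]
  | case2 x => simp [M]
  | case3 y t ih =>
    have hlen : (y :: y :: t).length - 1 = t.length + 1 := by simp
    rw [hlen, List.range'_succ, List.foldl_cons, getD_append_len,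
      getD_append_len1 u y y t, if_pos rfl, set_append_len, set_append_len1]
    have h2 : u ++ (y + y) :: (0:Int) :: t = (u ++ [y + y]) ++ 0 :: t := by simp
    have h3 : u.length + 1 = (u ++ [y + y]).length := by simp
    have h4 : t.length = ((0:Int) :: t).length - 1 := by simp
    rw [h2, h3, h4, ih]
    simp [M]
  | case4 x y t h ih =>
    have hlen : (x :: y :: t).length - 1 = t.length + 1 := by simp
    rw [hlen, List.range'_succ, List.foldl_cons, getD_append_len,
      getD_append_len1 u x y t, if_neg h]
    have h2 : u ++ x :: y :: t = (u ++ [x]) ++ y :: t := by simp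
    have h3 : u.length + 1 = (u ++ [x]).length := by simp
    have h4 : t.length = (y :: t).length - 1 := by simp
    rw [h2, h3, h4, ih]
    simp [M, h]

-- ---- one sorter pass equals P ----
lemma passFold (n : Nat) (w u : List Int) (hw : w.length = n) :
    (List.range' u.length w.length).foldl
      (fun b idx =>
        if b.getD idx 0 = 0 ∧ idx < b.length - 1 then
          let temp := b.getD idx 0
          (b.set idx (b.getD (idx+1) 0)).set (idx+1) temp
        else b) (u ++ w) = u ++ P w := by
  induction n generalizing w u with
  | zero =>
    have : w = [] := List.eq_nil_of_length_eq_zero hw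
    subst this; simp [P]
  | succ m ih =>
    match w with
    | [] => simp at hw
    | x :: t =>
      rw [show (x :: t).length = t.length + 1 from rfl, List.range'_succ, List.foldl_cons,
        getD_append_len]
      by_cases hx : x = 0
      · subst hx
        match t with
        | [] =>
          have hc : ¬ ((0:Int) = 0 ∧ u.length < (u ++ [(0:Int)]).length - 1) := by
            simp
          rw [if_neg hc]
          simp [P]
        | y :: t' =>
          have hc : (0:Int) = 0 ∧ u.length < (u ++ (0:Int) :: y :: t').length - 1 := by
            refine ⟨rfl, ?_⟩
            simp
          rw [if_pos hc, getD_append_len1, set_append_len, set_append_len1]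
          have h2 : u ++ y :: (0:Int) :: t' = (u ++ [y]) ++ 0 :: t' := by simp
          have h3 : u.length + 1 = (u ++ [y]).length := by simp
          have h4 : (y :: t').length = ((0:Int) :: t').length := rfl
          have hlen' : ((0:Int) :: t').length = m := by
            simp only [List.length_cons] at hw ⊢; omega
          rw [h2, h3, h4, ih ((0:Int) :: t') (u ++ [y]) hlen']
          simp [P]
      · have hc : ¬ ((x:Int) = 0 ∧ u.length < (u ++ x :: t).length - 1) := by
          intro h; exact hx h.1
        rw [if_neg hc]
        have h2 : u ++ x :: t = (u ++ [x]) ++ t := by simp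
        have h3 : u.length + 1 = (u ++ [x]).length := by simp
        have hlen' : t.length = m := by
          simp only [List.length_cons] at hw; omega
        rw [h2, h3, ih t (u ++ [x]) hlen']
        simp [P, hx]

lemma sorterPass_eq_P (a : List Int) : sorterPass a = P a := by
  have := passFold a.length a [] rfl
  simpa [sorterPass, List.range_eq_range'] using this

-- ---- P drives the list to the stable partition ----
lemma P_length (l : List Int) : (P l).length = l.length := by
  induction l with
  | nil => rfl
  | cons x t ih => by_cases hx : x = 0 <;> simp [P, hx, ih]

lemma P_filter (l : List Int) : (P l).filter (· ≠ 0) = l.filter (· ≠ 0) := by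
  induction l with
  | nil => rfl
  | cons x t ih =>
    by_cases hx : x = 0
    · subst hx
      simp [P, List.filter_append]
    · simp only [P, if_neg hx, List.filter_cons]
      rw [ih]

lemma part_P (l : List Int) : part (P l) = part l := by
  unfold part
  rw [P_filter, P_length]

lemma bad_append0 (t : List Int) : badZeros (t ++ [0]) = badZeros t := by
  induction t with
  | nil => simp [badZeros]
  | cons x t' ih =>
    have hany : ((t' ++ [(0:Int)]).any (· ≠ 0)) = t'.any (· ≠ 0) := by
      simp [List.any_append]
    simp only [List.cons_append, badZeros, ih, hany]

lemma all_zero_append (t : List Int) (h : ∀ y ∈ t, y = 0) : t ++ [(0:Int)] = 0 :: t := by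
  induction t with
  | nil => rfl
  | cons x t' ih =>
    have hx : x = 0 := h x (by simp)
    subst hx
    have := ih (fun y hy => h y (by simp [hy]))
    simp only [List.cons_append, this]

lemma bad_cons_zero_any (t : List Int) (hc : t.any (· ≠ 0)) :
    badZeros (0 :: t) = 1 + badZeros t := by
  show (if (0:Int) = 0 ∧ t.any (· ≠ 0) then 1 else 0) + badZeros t = 1 + badZeros t
  rw [if_pos ⟨rfl, hc⟩]

lemma bad_cons_skip (x : Int) (t : List Int) (h : ¬ (x = 0 ∧ t.any (· ≠ 0))) :
    badZeros (x :: t) = badZeros t := by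
  show (if x = 0 ∧ t.any (· ≠ 0) then 1 else 0) + badZeros t = badZeros t
  rw [if_neg h]
  exact Nat.zero_add _

lemma bad_all_zero (t : List Int) (h : ¬ t.any (· ≠ 0)) : badZeros t = 0 := by
  induction t with
  | nil => rfl
  | cons x t' ih =>
    simp only [List.any_cons, Bool.or_eq_true, not_or] at h
    rw [bad_cons_skip x t' (fun hc => h.2 hc.2)]
    exact ih (by simpa using h.2)

lemma any_of_not_all (t : List Int) (h : ¬ ∀ y ∈ t, y = (0:Int)) : t.any (· ≠ 0) := by
  by_contra hany
  apply h
  intro y hy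
  by_contra hyne
  exact hany (by simp only [List.any_eq_true, decide_eq_true_eq]; exact ⟨y, hy, hyne⟩)

lemma bad_zero_fix (l : List Int) (h : badZeros l = 0) : P l = l := by
  induction l with
  | nil => rfl
  | cons x t ih =>
    by_cases hx : x = 0
    · subst hx
      have hall : ∀ y ∈ t, y = (0:Int) := by
        by_contra hc
        rw [bad_cons_zero_any t (any_of_not_all t hc)] at h
        omega
      have hP : P ((0:Int) :: t) = t ++ [0] := by simp [P]
      rw [hP]
      exact all_zero_append t hall
    · have ht : badZeros t = 0 := by
        rw [bad_cons_skip x t (fun hc => hx hc.1)] at h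
        exact h
      simp [P, hx, ih ht]

lemma filter_len_le (l : List Int) : (l.filter (· ≠ 0)).length ≤ l.length :=
  List.length_filter_le _ _

lemma part_cons_ne (x : Int) (t : List Int) (hx : x ≠ 0) : part (x :: t) = x :: part t := by
  have hle := filter_len_le t
  have hfc : (x :: t).filter (· ≠ 0) = x :: t.filter (· ≠ 0) := by
    simp [hx]
  have hcnt : (x :: t).length - ((x :: t).filter (· ≠ 0)).length
      = t.length - (t.filter (· ≠ 0)).length := by
    rw [hfc]
    simp only [List.length_cons]
    omega
  unfold part
  rw [hcnt, hfc]
  simp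

lemma bad_zero_part (l : List Int) (h : badZeros l = 0) : part l = l := by
  induction l with
  | nil => rfl
  | cons x t ih =>
    by_cases hx : x = 0
    · subst hx
      have hall : ∀ y ∈ t, y = (0:Int) := by
        by_contra hc
        rw [bad_cons_zero_any t (any_of_not_all t hc)] at h
        omega
      have hfil : ((0 :: t).filter (· ≠ 0)) = [] := by
        rw [List.filter_eq_nil_iff]
        intro a ha
        rcases List.mem_cons.mp ha with h1 | h2
        · simp [h1]
        · simp [hall a h2]
      have ht : t = List.replicate t.length (0:Int) := List.eq_replicate_of_mem hall
      simp only [part, hfil, List.nil_append, List.length_cons, List.length_nil, Nat.sub_zero]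
      rw [List.replicate_succ]
      exact congrArg (0 :: ·) ht.symm
    · have ht : badZeros t = 0 := by
        rw [bad_cons_skip x t (fun hc => hx hc.1)] at h
        exact h
      rw [part_cons_ne x t hx, ih ht]

lemma bad_dec (l : List Int) (h : badZeros l ≠ 0) : badZeros (P l) = badZeros l - 1 := by
  induction l with
  | nil => simp [badZeros] at h
  | cons x t ih =>
    by_cases hx : x = 0
    · subst hx
      by_cases hany : t.any (· ≠ 0)
      · have hP : P ((0:Int) :: t) = t ++ [0] := by simp [P]
        rw [hP, bad_append0, bad_cons_zero_any t hany]
        omega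
      · exfalso
        apply h
        rw [bad_cons_skip 0 t (fun hc => hany hc.2)]
        exact bad_all_zero t hany
    · have heq : badZeros (x :: t) = badZeros t := bad_cons_skip x t (fun hc => hx hc.1)
      have ht : badZeros t ≠ 0 := by rw [heq] at h; exact h
      simp only [P, if_neg hx]
      rw [bad_cons_skip x (P t) ?_, ih ht, heq]
      intro hc
      exact hx hc.1

lemma bad_le (l : List Int) : badZeros l ≤ l.length - 1 := by
  induction l with
  | nil => simp [badZeros]
  | cons x t ih =>
    match t with
    | [] =>
      have : ¬ ((x = 0) ∧ ([] : List Int).any (· ≠ 0)) := by simp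
      rw [bad_cons_skip x [] this]
      simp [badZeros]
    | y :: t' =>
      have h2 : badZeros (y :: t') ≤ (y :: t').length - 1 := ih
      simp only [List.length_cons] at h2 ⊢
      have h3 : badZeros (x :: y :: t')
          = (if x = 0 ∧ (y :: t').any (· ≠ 0) then 1 else 0) + badZeros (y :: t') := rfl
      split_ifs at h3 <;> omega

lemma iterate_part (k : Nat) (l : List Int) (h : badZeros l ≤ k) : P^[k] l = part l := by
  induction k generalizing l with
  | zero =>
    have h0 : badZeros l = 0 := Nat.le_zero.mp h
    simpa using (bad_zero_part l h0).symm
  | succ m ih =>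
    by_cases h0 : badZeros l = 0
    · rw [Function.iterate_succ_apply, bad_zero_fix l h0]
      exact ih l (by omega)
    · rw [Function.iterate_succ_apply]
      have hb : badZeros (P l) ≤ m := by
        rw [bad_dec l h0]; omega
      rw [ih (P l) hb, part_P]

-- ---- M basics ----
lemma M_length (l : List Int) : (M l).length = l.length := by
  induction l using M.induct with
  | case1 => simp [M]
  | case2 x => simp [M]
  | case3 y t ih => simp [M] at ih ⊢; omega
  | case4 x y t h ih => simp [M, h] at ih ⊢; omega

-- ---- A = part ∘ M ----
lemma merger_eq_part (l : List Int) : merger l = part (M l) := by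
  have hm : (List.range (l.length - 1)).foldl
      (fun a idx =>
        if a.getD idx 0 = a.getD (idx+1) 0 then
          (a.set idx (a.getD idx 0 + a.getD (idx+1) 0)).set (idx+1) 0
        else a) l = M l := by
    have := mergeFold l []
    simpa [List.range_eq_range'] using this
  unfold merger
  rw [hm]
  unfold sorterA
  have hpass : (fun (a : List Int) (_ : Nat) => sorterPass a) = (fun a _ => P a) := by
    funext a i; exact sorterPass_eq_P a
  rw [hpass, foldl_range_const P ((M l).length - 1) (M l)]
  exact iterate_part _ _ (bad_le (M l))

-- ---- B = part ∘ M ----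
lemma Bfold (rest : List Int) (c : Int) (nz : List Int) :
    nzOf (rest.foldl stepB (nz, c)) = nz ++ (M (c :: rest)).filter (· ≠ 0) := by
  induction rest generalizing c nz with
  | nil =>
    simp only [List.foldl_nil, M, nzOf]
    by_cases hc : c = 0 <;> simp [hc]
  | cons x t ih =>
    rw [List.foldl_cons]
    by_cases hcx : c = x
    · rw [show stepB (nz, c) x = (if c ≠ 0 then nz ++ [c + x] else nz, 0) from by
        simp [stepB, hcx]]
      rw [ih]
      have hM : M (c :: x :: t) = (c + x) :: M (0 :: t) := by simp [M, hcx]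
      rw [hM, List.filter_cons]
      by_cases hc : c = 0
      · have hx0 : x = 0 := hcx ▸ hc
        subst hc; subst hx0
        simp
      · have hcc : c + x ≠ 0 := by subst hcx; omega
        simp [hc, hcc]
    · rw [show stepB (nz, c) x = (if c ≠ 0 then nz ++ [c] else nz, x) from by
        simp [stepB, hcx]]
      rw [ih]
      have hM : M (c :: x :: t) = c :: M (x :: t) := by simp [M, hcx]
      rw [hM, List.filter_cons]
      by_cases hc : c = 0 <;> simp [hc]

lemma merger_alt_eq_part (l : List Int) : merger_alt l = part (M l) := by
  match l with
  | [] => simp [merger_alt, part, M]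
  | c :: rest =>
    have hb := Bfold rest c []
    rw [List.nil_append] at hb
    show nzOf ((rest.foldl stepB ([], c))) ++
        List.replicate ((c :: rest).length - (nzOf (rest.foldl stepB ([], c))).length) 0 = _
    rw [hb]
    unfold part
    rw [M_length]

-- ===== VERDICT (by name: the statement is the Claim_ definition above) =====
theorem merger_spec : Claim_equal_merger := by
  intro l _
  unfold Spec_merger
  rw [merger_eq_part, merger_alt_eq_part]
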